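-- pv_equiv track=rewrite | github.com/sc-zhang/CATG | coll_asm_adj_gui/adjuster/adjuster.py | ins_pos
-- ===== SOURCE A (Python) =====
-- def ins_pos(agp_list, ins_agp_list, pos, ins_before=True):
--     adj_agp_list = []
--     base = 1
--     if ins_before:
--         ins_pos = pos[0]
--         order = [agp_list[:ins_pos], ins_agp_list, agp_list[ins_pos:]]
--     else:
--         ins_pos = pos[2]
--         order = [agp_list[:ins_pos+1], ins_agp_list, agp_list[ins_pos+1:]]
--     for cur_list in order:
--         for _ in cur_list:
--             _[0] = base
--             _[1] = base+_[3]-1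
--             adj_agp_list.append(_)
--             base += _[3]+100
--     return adj_agp_list
-- ===== SOURCE B (Python) =====
-- def ins_pos(agp_list, ins_agp_list, pos, ins_before=True):
--     # Back-to-front strategy: compute the total span once, then walk the
--     # flattened list in REVERSE, deriving each start as 1 + (total - suffix),
--     # collecting rows back-to-front and reversing at the end.
--     cut = pos[0] if ins_before else pos[2] + 1
--     flat = agp_list[:cut] + ins_agp_list + agp_list[cut:]
--     rem = sum(row[3] + 100 for row in flat)
--     out = []
--     for row in reversed(flat):
--         rem -= row[3] + 100
--         start = 1 + rem
--         row[0] = start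
--         row[1] = start + row[3] - 1
--         out.append(row)
--     out.reverse()
--     return out
-- ===== Notes on version B (the rewrite author's own statement) =====
-- stated objective: alternative
-- what changed: A assigns positions in a forward pass threading a running base accumulator through nested loops over three slices; B instead totals the spans once and traverses the flattened list BACKWARDS, deriving each start as 1 + (total - suffix span), building the result back-to-front and reversing it.
import Mathlib
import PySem

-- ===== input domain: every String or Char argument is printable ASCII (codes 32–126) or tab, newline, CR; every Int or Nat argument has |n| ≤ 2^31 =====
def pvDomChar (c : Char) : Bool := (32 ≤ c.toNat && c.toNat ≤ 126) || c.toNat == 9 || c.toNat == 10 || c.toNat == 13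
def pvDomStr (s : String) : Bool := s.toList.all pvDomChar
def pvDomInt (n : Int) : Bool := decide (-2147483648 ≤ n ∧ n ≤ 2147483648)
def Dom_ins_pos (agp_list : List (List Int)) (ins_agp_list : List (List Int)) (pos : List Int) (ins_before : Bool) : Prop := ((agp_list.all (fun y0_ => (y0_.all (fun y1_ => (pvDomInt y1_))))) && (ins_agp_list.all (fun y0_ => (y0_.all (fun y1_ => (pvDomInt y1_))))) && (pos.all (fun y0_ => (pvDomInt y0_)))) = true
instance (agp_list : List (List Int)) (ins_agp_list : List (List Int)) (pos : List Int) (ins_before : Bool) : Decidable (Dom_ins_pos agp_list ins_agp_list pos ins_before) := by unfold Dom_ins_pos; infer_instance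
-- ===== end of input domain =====

-- B replaces A's forward running-base pass by a total-then-reverse traversal (start = 1 + total - suffix span),
-- building the output back-to-front; alternative decomposition, same O(n) cost; equivalence is about the returned rows
-- (both Pythons mutate the input rows in place).


-- ===== PORT A =====
-- _[0] = base; _[1] = base + _[3] - 1   (in-place row update, ported as a value update)
def pvAssignA (base : Int) (row : List Int) : List Int :=
  (row.set 0 base).set 1 (base + PySem.List.pyGetD row 3 0 - 1)

-- the inner 'for _ in cur_list' body over state (adj_agp_list, base)
def pvLoopA (st : List (List Int) × Int) (cur : List (List Int)) : List (List Int) × Int :=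
  cur.foldl (fun st r => (st.1 ++ [pvAssignA st.2 r], st.2 + PySem.List.pyGetD r 3 0 + 100)) st

def ins_pos (agp_list : List (List Int)) (ins_agp_list : List (List Int)) (pos : List Int) (ins_before : Bool) : List (List Int) :=
  let order :=
    if ins_before then
      let ip := PySem.List.pyGetD pos 0 0
      [PySem.List.slice agp_list none (some ip), ins_agp_list, PySem.List.slice agp_list (some ip) none]
    else
      let ip := PySem.List.pyGetD pos 2 0
      [PySem.List.slice agp_list none (some (ip + 1)), ins_agp_list, PySem.List.slice agp_list (some (ip + 1)) none]
  (order.foldl pvLoopA ([], 1)).1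

-- ===== PORT B =====
def ins_pos_alt (agp_list : List (List Int)) (ins_agp_list : List (List Int)) (pos : List Int) (ins_before : Bool) : List (List Int) :=
  let cut := if ins_before then PySem.List.pyGetD pos 0 0 else PySem.List.pyGetD pos 2 0 + 1
  let flat := PySem.List.slice agp_list none (some cut) ++ ins_agp_list ++ PySem.List.slice agp_list (some cut) none
  -- rem = sum(row[3] + 100 for row in flat)
  let total := (flat.map (fun row => PySem.List.pyGetD row 3 0 + 100)).sum
  -- for row in reversed(flat): rem -= row[3]+100; start = 1+rem; row[0]=start; row[1]=start+row[3]-1; out.append(row)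
  let st := flat.reverse.foldl
    (fun (st : List (List Int) × Int) row =>
      let rem := st.2 - (PySem.List.pyGetD row 3 0 + 100)
      let start := 1 + rem
      (st.1 ++ [(row.set 0 start).set 1 (start + PySem.List.pyGetD row 3 0 - 1)], rem))
    ([], total)
  st.1.reverse

-- ===== PRECONDITION & SPEC =====
-- Pre_ = exactly where Python A returns: pos long enough for the index it reads, and every
-- row of length ≥ 4 (shorter rows make '_[1] = base+_[3]-1' raise IndexError).
def Pre_ins_pos (agp_list : List (List Int)) (ins_agp_list : List (List Int)) (pos : List Int) (ins_before : Bool) : Prop :=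
  (if ins_before then pos ≠ [] else 3 ≤ pos.length) ∧
  (∀ r ∈ agp_list, 4 ≤ r.length) ∧ (∀ r ∈ ins_agp_list, 4 ≤ r.length)
instance (agp_list : List (List Int)) (ins_agp_list : List (List Int)) (pos : List Int) (ins_before : Bool) : Decidable (Pre_ins_pos agp_list ins_agp_list pos ins_before) := by unfold Pre_ins_pos; infer_instance

def pvWitness_ins_pos : List (List Int) × List (List Int) × List Int × Bool :=
  ([[0, 0, 0, 5], [0, 0, 0, 7]], [[0, 0, 0, 3]], [1, 0, 1], true)

def Spec_ins_pos (agp_list : List (List Int)) (ins_agp_list : List (List Int)) (pos : List Int) (ins_before : Bool) (out : List (List Int)) : Prop := out = ins_pos_alt agp_list ins_agp_list pos ins_before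
instance (agp_list : List (List Int)) (ins_agp_list : List (List Int)) (pos : List Int) (ins_before : Bool) (out : List (List Int)) : Decidable (Spec_ins_pos agp_list ins_agp_list pos ins_before out) := by unfold Spec_ins_pos; infer_instance

-- ===== CLAIM (what is proved, stated in full; the proofs are below) =====
def Claim_equal_ins_pos : Prop := ∀ (agp_list : List (List Int)) (ins_agp_list : List (List Int)) (pos : List Int) (ins_before : Bool), Dom_ins_pos agp_list ins_agp_list pos ins_before → Pre_ins_pos agp_list ins_agp_list pos ins_before → Spec_ins_pos agp_list ins_agp_list pos ins_before (ins_pos agp_list ins_agp_list pos ins_before)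

-- ===== LEMMAS AND PROOFS =====

-- forward characterisation: the start position of every row
def pvStarts (base : Int) : List (List Int) → List Int
  | [] => []
  | r :: rs => base :: pvStarts (base + PySem.List.pyGetD r 3 0 + 100) rs

def pvSum (l : List (List Int)) : Int := (l.map (fun r => PySem.List.pyGetD r 3 0 + 100)).sum

lemma pvSum_cons (r : List Int) (rs : List (List Int)) :
    pvSum (r :: rs) = PySem.List.pyGetD r 3 0 + 100 + pvSum rs := by
  simp [pvSum]

lemma pvZip_starts_append (f : List Int → Int → List Int) (l1 l2 : List (List Int)) (base : Int) :
    List.zipWith f (l1 ++ l2) (pvStarts base (l1 ++ l2))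
      = List.zipWith f l1 (pvStarts base l1) ++ List.zipWith f l2 (pvStarts (base + pvSum l1) l2) := by
  induction l1 generalizing base with
  | nil => simp [pvStarts, pvSum]
  | cons r rs ih => simp [pvStarts, ih, pvSum_cons]; rw [show base + (PySem.List.pyGetD r 3 0 + 100 + pvSum rs) = base + PySem.List.pyGetD r 3 0 + 100 + pvSum rs by ring]

-- A's inner loop produces the zip of the rows with their forward starts
lemma pvLoopA_spec (l : List (List Int)) (acc : List (List Int)) (base : Int) :
    pvLoopA (acc, base) l
      = (acc ++ List.zipWith (fun row start => (row.set 0 start).set 1 (start + PySem.List.pyGetD row 3 0 - 1)) l (pvStarts base l),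
         base + pvSum l) := by
  induction l generalizing acc base with
  | nil => simp [pvLoopA, pvStarts, pvSum]
  | cons r rs ih =>
    simp only [pvLoopA, List.foldl_cons] at *
    rw [ih]
    simp [pvStarts, pvSum_cons, pvAssignA]; ring_nf

-- B's backward loop produces the REVERSE of the same zip
lemma pvLoopB_spec (l : List (List Int)) (acc : List (List Int)) (b : Int) :
    l.reverse.foldl
      (fun (st : List (List Int) × Int) row =>
        let rem := st.2 - (PySem.List.pyGetD row 3 0 + 100)
        let start := 1 + rem
        (st.1 ++ [(row.set 0 start).set 1 (start + PySem.List.pyGetD row 3 0 - 1)], rem))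
      (acc, b + pvSum l)
      = (acc ++ (List.zipWith (fun row start => (row.set 0 start).set 1 (start + PySem.List.pyGetD row 3 0 - 1)) l (pvStarts (1 + b) l)).reverse, b) := by
  induction l generalizing acc b with
  | nil => simp [pvSum]
  | cons r rs ih =>
    simp only [List.reverse_cons, List.foldl_append, List.foldl_cons, List.foldl_nil]
    have h1 : b + pvSum (r :: rs) = (b + (PySem.List.pyGetD r 3 0 + 100)) + pvSum rs := by
      rw [pvSum_cons]; ring
    rw [h1, ih]
    simp only [pvStarts, List.zipWith_cons_cons, List.reverse_cons]
    have h2 : b + (PySem.List.pyGetD r 3 0 + 100) - (PySem.List.pyGetD r 3 0 + 100) = b := by ring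
    have h3 : 1 + (b + (PySem.List.pyGetD r 3 0 + 100)) = 1 + b + PySem.List.pyGetD r 3 0 + 100 := by ring
    simp [h2, h3]

lemma pv_main (l1 l2 l3 : List (List Int)) :
    (List.foldl pvLoopA ([], 1) [l1, l2, l3]).1
      = (((l1 ++ l2 ++ l3).reverse.foldl
          (fun (st : List (List Int) × Int) row =>
            let rem := st.2 - (PySem.List.pyGetD row 3 0 + 100)
            let start := 1 + rem
            (st.1 ++ [(row.set 0 start).set 1 (start + PySem.List.pyGetD row 3 0 - 1)], rem))
          ([], ((l1 ++ l2 ++ l3).map (fun row => PySem.List.pyGetD row 3 0 + 100)).sum)).1).reverse := by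
  have htot : ((l1 ++ l2 ++ l3).map (fun row => PySem.List.pyGetD row 3 0 + 100)).sum
      = 0 + pvSum (l1 ++ l2 ++ l3) := by simp [pvSum]
  rw [htot, pvLoopB_spec]
  simp only [List.foldl_cons, List.foldl_nil, pvLoopA_spec, List.nil_append, List.reverse_reverse]
  rw [List.append_assoc l1 l2 l3, pvZip_starts_append, pvZip_starts_append]
  simp [List.append_assoc]

-- ===== VERDICT (by name: the statement is the Claim_ definition above) =====
theorem ins_pos_spec : Claim_equal_ins_pos := by
  intro agp ins pos ib _ _
  show ins_pos agp ins pos ib = ins_pos_alt agp ins pos ib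
  unfold ins_pos ins_pos_alt
  cases ib <;> simp only [Bool.false_eq_true, if_true, if_false] <;> exact pv_main _ _ _
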